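-- pv_equiv track=rewrite | github.com/vitaltechsol/AES-Aviologic-Settings | config/logic/mcdu_logic_A739_v2.py | _fmt_row
-- ===== SOURCE A (Python) =====
-- COLS = 24
--
-- def _fmt_row(left: str="", center: str="", right: str="") -> str:
--     buf = [ " " ] * COLS
--     rs = max(0, COLS - len(right))
--     for i,ch in enumerate(right[:COLS]): buf[rs+i] = ch
--     for i,ch in enumerate(left[:COLS]): buf[i] = ch
--     cs = max(0, (COLS - len(center))//2)
--     for i,ch in enumerate(center[:COLS]): buf[cs+i] = ch
--     return "".join(buf)
-- ===== SOURCE B (Python) =====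
-- COLS = 24
--
-- def _fmt_row(left: str="", center: str="", right: str="") -> str:
--     cs = max(0, (COLS - len(center)) // 2)
--     rs = max(0, COLS - len(right))
--     C, L, R = center[:COLS], left[:COLS], right[:COLS]
--     def pick(j):
--         if cs <= j < cs + len(C):
--             return C[j - cs]
--         if j < len(L):
--             return L[j]
--         if rs <= j < rs + len(R):
--             return R[j - rs]
--         return " "
--     return "".join(pick(j) for j in range(COLS))
-- ===== Notes on version B (the rewrite author's own statement) =====
-- stated objective: alternative
-- what changed: Replaced A's mutable 24-cell buffer filled by three overwriting write passes with a single pass over the 24 output positions that selects each character by the precedence center > left > right > space.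
import Mathlib
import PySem

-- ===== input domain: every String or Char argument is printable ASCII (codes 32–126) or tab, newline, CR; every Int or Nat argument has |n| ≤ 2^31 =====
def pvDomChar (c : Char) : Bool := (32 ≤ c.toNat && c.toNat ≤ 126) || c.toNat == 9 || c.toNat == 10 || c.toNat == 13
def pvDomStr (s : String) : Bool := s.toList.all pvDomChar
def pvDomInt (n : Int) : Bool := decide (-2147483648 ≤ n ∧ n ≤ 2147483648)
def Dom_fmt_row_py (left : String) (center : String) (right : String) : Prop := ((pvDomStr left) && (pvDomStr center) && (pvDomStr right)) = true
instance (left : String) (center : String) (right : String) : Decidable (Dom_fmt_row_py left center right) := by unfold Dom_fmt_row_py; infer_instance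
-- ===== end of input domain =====

-- B is an alternative decomposition: one pass over the 24 output positions selecting each
-- character by precedence (center > left > right > space) instead of A's three overwriting
-- write passes into a mutable buffer. Same cost; no speed claim.

-- ===== PORT A =====
-- 'for i,ch in enumerate(s): buf[off+i] = ch' as structural recursion on s
def pvWrite : List Char → Nat → List Char → List Char
  | buf, _, [] => buf
  | buf, off, c :: cs => pvWrite (buf.set off c) (off + 1) cs

def fmt_row_py (left : String) (center : String) (right : String) : String :=
  let buf0 := List.replicate 24 ' '
  let rs : Int := max 0 (24 - (right.toList.length : Int))
  -- rs ≥ 0 always, so .toNat is exact here; s[:24] = take 24 (exact: 24 ≥ 0)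
  let buf1 := pvWrite buf0 rs.toNat (right.toList.take 24)
  let buf2 := pvWrite buf1 0 (left.toList.take 24)
  let cs : Int := max 0 (PySem.Int.floordiv (24 - (center.toList.length : Int)) 2)
  let buf3 := pvWrite buf2 cs.toNat (center.toList.take 24)
  String.mk buf3

-- ===== PORT B =====
def pvPick (L C R : List Char) (cs rs j : Nat) : Char :=
  if cs ≤ j ∧ j < cs + C.length then C.getD (j - cs) ' '
  else if j < L.length then L.getD j ' '
  else if rs ≤ j ∧ j < rs + R.length then R.getD (j - rs) ' '
  else ' '

def fmt_row_py_alt (left : String) (center : String) (right : String) : String :=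
  let cs : Int := max 0 (PySem.Int.floordiv (24 - (center.toList.length : Int)) 2)
  let rs : Int := max 0 (24 - (right.toList.length : Int))
  let C := center.toList.take 24
  let L := left.toList.take 24
  let R := right.toList.take 24
  String.mk ((List.range 24).map fun j => pvPick L C R cs.toNat rs.toNat j)

-- ===== PRECONDITION & SPEC =====
def Spec_fmt_row_py (left : String) (center : String) (right : String) (out : String) : Prop := out = fmt_row_py_alt left center right
instance (left : String) (center : String) (right : String) (out : String) : Decidable (Spec_fmt_row_py left center right out) := by unfold Spec_fmt_row_py; infer_instance

-- ===== CLAIM (what is proved, stated in full; the proofs are below) =====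
def Claim_equal_fmt_row_py : Prop := ∀ (left : String) (center : String) (right : String), Dom_fmt_row_py left center right → Spec_fmt_row_py left center right (fmt_row_py left center right)

-- ===== LEMMAS AND PROOFS =====

theorem pvWrite_length (s : List Char) (buf : List Char) (off : Nat) :
    (pvWrite buf off s).length = buf.length := by
  induction s generalizing buf off with
  | nil => rfl
  | cons c cs ih => simp [pvWrite, ih]

theorem pvWrite_getD (s : List Char) (buf : List Char) (off j : Nat)
    (h : off + s.length ≤ buf.length) :
    (pvWrite buf off s).getD j ' ' =
      if off ≤ j ∧ j < off + s.length then s.getD (j - off) ' ' else buf.getD j ' ' := by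
  induction s generalizing buf off with
  | nil => simp [pvWrite]
  | cons c cs ih =>
    simp only [pvWrite]
    have hset : off + 1 + cs.length ≤ (buf.set off c).length := by
      simp only [List.length_set, List.length_cons] at *; omega
    rw [ih (buf.set off c) (off + 1) hset]
    have hoff : off < buf.length := by simp at h; omega
    by_cases h1 : off + 1 ≤ j ∧ j < off + 1 + cs.length
    · have : off ≤ j ∧ j < off + (c :: cs).length := by simp; omega
      simp only [if_pos h1, if_pos this]
      have : j - off = (j - (off + 1)) + 1 := by omega
      rw [this]; simp
    · simp only [if_neg h1]
      by_cases h2 : j = off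
      · have hcond : off ≤ j ∧ j < off + (c :: cs).length := by simp; omega
        simp only [if_pos hcond]
        rw [h2]
        simp [List.getD, List.getElem?_set_self hoff]
      · have h3 : ¬ (off ≤ j ∧ j < off + (c :: cs).length) := by simp; omega
        simp only [if_neg h3]
        simp [List.getD, List.getElem?_set_ne (by omega : off ≠ j)]

-- ===== VERDICT (by name: the statement is the Claim_ definition above) =====
theorem fmt_row_py_spec : Claim_equal_fmt_row_py := by
  intro left center right _
  unfold Spec_fmt_row_py fmt_row_py fmt_row_py_alt
  simp only []
  -- abbreviations
  set R := right.toList.take 24 with hR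
  set L := left.toList.take 24 with hL
  set C := center.toList.take 24 with hC
  set rsI : Int := max 0 (24 - (right.toList.length : Int)) with hrsI
  set csI : Int := max 0 (PySem.Int.floordiv (24 - (center.toList.length : Int)) 2) with hcsI
  have hRlen : R.length = min right.toList.length 24 := by simp [hR, Nat.min_comm]
  have hLlen : L.length ≤ 24 := by simp [hL]
  have hClen : C.length = min center.toList.length 24 := by simp [hC, Nat.min_comm]
  have hrs : rsI.toNat + R.length ≤ 24 := by
    rw [hRlen, hrsI]; omega
  have hcs : csI.toNat + C.length ≤ 24 := by
    rw [hClen, hcsI]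
    rw [PySem.Int.floordiv_eq_ediv_of_pos (by omega : (0:Int) < 2)]
    omega
  apply congrArg String.mk
  have len1 : (pvWrite (List.replicate 24 ' ') rsI.toNat R).length = 24 := by
    rw [pvWrite_length]; simp
  have len2 : (pvWrite (pvWrite (List.replicate 24 ' ') rsI.toNat R) 0 L).length = 24 := by
    rw [pvWrite_length]; exact len1
  have len3 : (pvWrite (pvWrite (pvWrite (List.replicate 24 ' ') rsI.toNat R) 0 L) csI.toNat C).length = 24 := by
    rw [pvWrite_length]; exact len2
  apply List.ext_getElem
  · rw [len3]; simp
  · intro j hj hj'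
    have hj24 : j < 24 := by omega
    rw [← List.getD_eq_getElem _ ' ' hj, ← List.getD_eq_getElem _ ' ' hj']
    rw [pvWrite_getD C _ csI.toNat j (by rw [len2]; exact hcs)]
    rw [pvWrite_getD L _ 0 j (by rw [len1]; omega)]
    rw [pvWrite_getD R _ rsI.toNat j (by simpa using hrs)]
    have hmap : ((List.range 24).map fun j => pvPick L C R csI.toNat rsI.toNat j).getD j ' '
        = pvPick L C R csI.toNat rsI.toNat j := by
      rw [List.getD_eq_getElem _ ' ' (by simpa using hj24)]
      simp
    rw [hmap]
    unfold pvPick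
    by_cases h1 : csI.toNat ≤ j ∧ j < csI.toNat + C.length
    · simp [h1]
    · simp only [if_neg h1]
      by_cases h2 : j < L.length
      · have : 0 ≤ j ∧ j < 0 + L.length := by omega
        simp [this, h2]
      · have h2' : ¬ (0 ≤ j ∧ j < 0 + L.length) := by omega
        simp only [if_neg h2', if_neg h2]
        split_ifs with h3
        · rfl
        · interval_cases j <;> rfl
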